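-- pv_equiv track=rewrite | github.com/terrene-foundation/kailash-py | src/kailash/utils/url_credentials.py | preencode_password_special_chars
-- ===== SOURCE A (Python) =====
-- from typing import Optional, Tuple
--
-- def preencode_password_special_chars(connection_string: Optional[str]) -> str:
--     """Pre-encode raw ``#$@?`` characters in the password portion of a URL.
--
--     A user-friendliness helper for operators who paste a raw
--     ``DATABASE_URL`` into an environment file without URL-encoding
--     the special characters their password actually contains.
--     ``urlparse`` treats a raw ``#`` as the start of the URL fragment
--     and silently drops everything after it, which is the failure
--     mode Arbor originally reported as P3 in the session brief.
--
--     The helper finds the LAST ``@`` in the non-scheme portion (so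
--     ``@`` inside a password survives), splits user and password on
--     the FIRST ``:`` (so ``:`` inside a password survives), and
--     percent-encodes ``#``, ``$``, ``@``, and ``?`` in the password.
--     Downstream callers then run ``urlparse`` + ``unquote`` to
--     recover the literal bytes.
--
--     All five dialect parsers (``src/kailash/db/connection.py``,
--     ``src/kailash/trust/esa/database.py``,
--     ``src/kailash/nodes/data/async_sql.py``,
--     ``packages/kailash-dataflow/src/dataflow/core/pool_utils.py``,
--     ``packages/kaizen-agents/src/kaizen_agents/patterns/state_manager.py``)
--     MUST call this helper before ``urlparse`` so the leniency is
--     uniform — otherwise raw special characters in passwords work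
--     in one code path and silently break auth in another.
--
--     Origin: ``workspaces/arbor-upstream-fixes`` red team round 2 —
--     R2 E.1 surfaced that the pre-encoding step existed only inside
--     ``dataflow.adapters.connection_parser.ConnectionParser`` and
--     was not applied at the five direct-dialect parse sites. The
--     resulting asymmetry meant a ``mysql://user:p#ass@host/db`` URL
--     would be accepted by migration code paths (via
--     ``parse_connection_string``) and rejected everywhere else.
--     Promoting the helper here makes the leniency uniform.
--
--     Args:
--         connection_string: A ``scheme://user:password@host:port/db`` URL
--             that MAY contain raw unencoded special characters in the
--             password. A ``None`` or non-credential URL is returned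
--             unchanged.
--
--     Returns:
--         The connection string with raw ``#$@?`` in the password
--         percent-encoded. All other characters are preserved.
--     """
--     if connection_string is None:
--         return ""
--
--     if "://" not in connection_string:
--         return connection_string
--
--     protocol_part, rest = connection_string.split("://", 1)
--
--     if "@" not in rest:
--         return connection_string
--
--     # Find the LAST @ symbol — separates credentials from host; this
--     # handles passwords that contain literal @ characters.
--     last_at_index = rest.rfind("@")
--     creds_part = rest[:last_at_index]
--     host_part = rest[last_at_index + 1 :]
--
--     if ":" not in creds_part:
--         return connection_string
--
--     # Split user and password on the FIRST colon — handles passwords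
--     # that contain literal : characters.
--     colon_index = creds_part.find(":")
--     username = creds_part[:colon_index]
--     password = creds_part[colon_index + 1 :]
--
--     special_chars = {"#": "%23", "$": "%24", "@": "%40", "?": "%3F"}
--     encoded_password = password
--     for char, encoded in special_chars.items():
--         encoded_password = encoded_password.replace(char, encoded)
--
--     return f"{protocol_part}://{username}:{encoded_password}@{host_part}"
-- ===== SOURCE B (Python) =====
-- from typing import Optional, Tuple
--
--
-- def _encode_char(c: str) -> str:
--     if c == "#":
--         return "%23"
--     if c == "$":
--         return "%24"
--     if c == "@":
--         return "%40"
--     if c == "?":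
--         return "%3F"
--     return c
--
--
-- def _password_span(cs: str) -> Optional[Tuple[str, str, int, int]]:
--     """Locate the password span: returns (head, rest, colon, at) where the
--     password is rest[colon+1:at], or None if the URL carries no credentials."""
--     if "://" not in cs:
--         return None
--     head, rest = cs.split("://", 1)
--     if "@" not in rest:
--         return None
--     at_idx = rest.rfind("@")
--     creds = rest[:at_idx]
--     if ":" not in creds:
--         return None
--     return head, rest, creds.find(":"), at_idx
--
--
-- def preencode_password_special_chars(connection_string: Optional[str]) -> str:
--     """Span-based variant: locate the password span once, then rebuild the URL
--     from three slices, encoding the span character by character in one pass."""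
--     if connection_string is None:
--         return ""
--     span = _password_span(connection_string)
--     if span is None:
--         return connection_string
--     head, rest, colon, at_idx = span
--     encoded = "".join(_encode_char(c) for c in rest[colon + 1 : at_idx])
--     return head + "://" + rest[: colon + 1] + encoded + rest[at_idx:]
-- ===== Notes on version B (the rewrite author's own statement) =====
-- stated objective: alternative
-- what changed: B locates the password as an index span via a helper and rebuilds the URL from three slices around that span, encoding the span in a single character-by-character pass, instead of A's parse into five named parts, four sequential .replace passes, and seven-piece f-string rejoin.
import Mathlib
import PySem

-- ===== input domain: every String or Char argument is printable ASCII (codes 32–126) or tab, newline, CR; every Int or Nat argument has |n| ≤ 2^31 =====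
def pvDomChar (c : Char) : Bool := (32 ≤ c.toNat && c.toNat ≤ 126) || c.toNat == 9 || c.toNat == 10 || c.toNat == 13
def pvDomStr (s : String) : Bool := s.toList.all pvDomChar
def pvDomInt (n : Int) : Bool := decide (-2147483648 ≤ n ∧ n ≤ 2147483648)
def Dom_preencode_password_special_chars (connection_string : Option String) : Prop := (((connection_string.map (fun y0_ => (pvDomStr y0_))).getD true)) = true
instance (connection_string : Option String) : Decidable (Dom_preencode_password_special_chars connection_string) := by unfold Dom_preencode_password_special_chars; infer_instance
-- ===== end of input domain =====

-- B locates the password as an index span (helper) and rebuilds the URL from three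
-- slices around it with a single-pass character encoder, instead of A's parse into
-- five named parts, four sequential `.replace` passes and seven-piece rejoin.

-- ===== PORT A =====
-- A's encoding step: loop over the dict's items, one full `.replace` pass each.
def pvEncA (password : String) : String :=
  (PySem.Dict.ofList [("#", "%23"), ("$", "%24"), ("@", "%40"), ("?", "%3F")]).items.foldl
    (fun acc kv => PySem.Str.replace acc kv.1 kv.2) password

def preencode_password_special_chars (connection_string : Option String) : String :=
  match connection_string with
  | none => ""
  | some s =>
    if PySem.Str.isIn "://" s = false then s else
    let parts := (PySem.Str.splitMax? s "://" 1).getD []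
    let protocol_part := parts.getD 0 ""
    let rest := parts.getD 1 ""
    if PySem.Str.isIn "@" rest = false then s else
    let last_at_index := PySem.Str.rfind rest "@"
    let creds_part := PySem.Str.slice rest none (some last_at_index)
    let host_part := PySem.Str.slice rest (some (last_at_index + 1)) none
    if PySem.Str.isIn ":" creds_part = false then s else
    let colon_index := PySem.Str.find creds_part ":"
    let username := PySem.Str.slice creds_part none (some colon_index)
    let password := PySem.Str.slice creds_part (some (colon_index + 1)) none
    -- f-string: concatenation of the seven pieces
    protocol_part ++ "://" ++ username ++ ":" ++ pvEncA password ++ "@" ++ host_part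

-- ===== PORT B =====
def pvEncChar (c : Char) : String :=
  if c = '#' then "%23"
  else if c = '$' then "%24"
  else if c = '@' then "%40"
  else if c = '?' then "%3F"
  else String.singleton c

-- _password_span: (head, rest, colon, at) with the password at rest[colon+1:at], or none
def pvPasswordSpan (cs : String) : Option (String × String × Int × Int) :=
  if PySem.Str.isIn "://" cs = false then none else
  let parts := (PySem.Str.splitMax? cs "://" 1).getD []
  let head := parts.getD 0 ""
  let rest := parts.getD 1 ""
  if PySem.Str.isIn "@" rest = false then none else
  let at_idx := PySem.Str.rfind rest "@"
  let creds := PySem.Str.slice rest none (some at_idx)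
  if PySem.Str.isIn ":" creds = false then none else
  some (head, rest, PySem.Str.find creds ":", at_idx)

def preencode_password_special_chars_alt (connection_string : Option String) : String :=
  match connection_string with
  | none => ""
  | some s =>
    match pvPasswordSpan s with
    | none => s
    | some (head, rest, colon, at_idx) =>
      let encoded := PySem.Str.join ""
        ((PySem.Str.slice rest (some (colon + 1)) (some at_idx)).toList.map pvEncChar)
      head ++ "://" ++ PySem.Str.slice rest none (some (colon + 1)) ++ encoded
        ++ PySem.Str.slice rest (some at_idx) none

-- ===== PRECONDITION & SPEC =====
def Spec_preencode_password_special_chars (connection_string : Option String) (out : String) : Prop := out = preencode_password_special_chars_alt connection_string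
instance (connection_string : Option String) (out : String) : Decidable (Spec_preencode_password_special_chars connection_string out) := by unfold Spec_preencode_password_special_chars; infer_instance

-- ===== CLAIM (what is proved, stated in full; the proofs are below) =====
def Claim_equal_preencode_password_special_chars : Prop := ∀ (connection_string : Option String), Dom_preencode_password_special_chars connection_string → Spec_preencode_password_special_chars connection_string (preencode_password_special_chars connection_string)

-- ===== LEMMAS AND PROOFS =====

-- Replacing one single-character needle, as a flatMap over the list.
def pvSub (o : Char) (new : List Char) (l : List Char) : List Char :=
  l.flatMap (fun c => if c = o then new else [c])

theorem pvGo_single (o : Char) (new : List Char) :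
    ∀ (l acc : List Char) (fuel : Nat), l.length ≤ fuel →
      PySem.Chars.replace.go [o] new fuel l acc = acc.reverse ++ pvSub o new l := by
  intro l
  induction l with
  | nil =>
    intro acc fuel _
    cases fuel <;> simp [PySem.Chars.replace.go, pvSub]
  | cons c t ih =>
    intro acc fuel hfuel
    cases fuel with
    | zero => simp at hfuel
    | succ f =>
      by_cases hc : c = o
      · subst hc
        have hpre : List.isPrefixOf [c] (c :: t) = true := by
          simp [List.isPrefixOf]
        simp only [PySem.Chars.replace.go, hpre, if_pos]
        rw [show List.drop [c].length (c :: t) = t from rfl]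
        rw [ih (new.reverse ++ acc) f (by simpa using hfuel)]
        simp [pvSub]
      · have hpre : List.isPrefixOf [o] (c :: t) = false := by
          simp [List.isPrefixOf]
          exact fun h => (hc h.symm).elim
        simp only [PySem.Chars.replace.go, hpre, Bool.false_eq_true, if_neg, not_false_iff]
        rw [ih (c :: acc) f (by simpa using hfuel)]
        simp [pvSub, hc]

theorem pvReplace_single (o : Char) (new l : List Char) :
    PySem.Chars.replace l [o] new = pvSub o new l := by
  rw [PySem.Chars.replace]
  simp only [List.isEmpty_cons, Bool.false_eq_true, if_neg, not_false_iff]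
  exact pvGo_single o new l [] l.length le_rfl

theorem pvSub_append (o : Char) (new a b : List Char) :
    pvSub o new (a ++ b) = pvSub o new a ++ pvSub o new b := by
  simp [pvSub]

theorem pvChain_head (c : Char) :
    pvSub '?' "%3F".toList (pvSub '@' "%40".toList (pvSub '$' "%24".toList (pvSub '#' "%23".toList [c])))
      = (pvEncChar c).toList := by
  by_cases h1 : c = '#'
  · subst h1; simp [pvSub, pvEncChar]
  · by_cases h2 : c = '$'
    · subst h2; simp [pvSub, pvEncChar]
    · by_cases h3 : c = '@'
      · subst h3; simp [pvSub, pvEncChar]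
      · by_cases h4 : c = '?'
        · subst h4; simp [pvSub, pvEncChar]
        · simp [pvSub, pvEncChar, h1, h2, h3, h4]

theorem pvChain_eq (l : List Char) :
    pvSub '?' "%3F".toList (pvSub '@' "%40".toList (pvSub '$' "%24".toList (pvSub '#' "%23".toList l)))
      = (l.map (fun c => (pvEncChar c).toList)).flatten := by
  induction l with
  | nil => simp [pvSub]
  | cons c t ih =>
    rw [show (c :: t) = [c] ++ t from rfl]
    simp only [pvSub_append]
    rw [ih, pvChain_head]
    simp

-- ''.join on lists of chars with empty separator is flatten.
theorem pvJoin_nil_flatten (xss : List (List Char)) :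
    PySem.Chars.join [] xss = xss.flatten := by
  induction xss with
  | nil => simp [PySem.Chars.join_nil]
  | cons p rest ih =>
    cases rest with
    | nil => simp [PySem.Chars.join_singleton]
    | cons q r => rw [PySem.Chars.join_cons_cons, ih]; simp

theorem pvEncA_toList (pw : String) :
    (pvEncA pw).toList = (pw.toList.map (fun c => (pvEncChar c).toList)).flatten := by
  have hitems : (PySem.Dict.ofList [("#", "%23"), ("$", "%24"), ("@", "%40"), ("?", "%3F")] : PySem.Dict String String).items
      = [("#", "%23"), ("$", "%24"), ("@", "%40"), ("?", "%3F")] := rfl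
  have hA : (pvEncA pw).toList =
      PySem.Chars.replace (PySem.Chars.replace (PySem.Chars.replace (PySem.Chars.replace pw.toList "#".toList "%23".toList) "$".toList "%24".toList) "@".toList "%40".toList) "?".toList "%3F".toList := by
    rw [pvEncA, hitems]
    simp only [List.foldl_cons, List.foldl_nil, PySem.Str.toList_replace]
  rw [hA]
  have h1 : "#".toList = ['#'] := rfl
  have h2 : "$".toList = ['$'] := rfl
  have h3 : "@".toList = ['@'] := rfl
  have h4 : "?".toList = ['?'] := rfl
  rw [h1, h2, h3, h4, pvReplace_single, pvReplace_single, pvReplace_single, pvReplace_single]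
  exact pvChain_eq pw.toList

-- rfind: if some occurrence exists up to j, rfind.go returns an occurrence.
theorem pvRfindGo_found (s sub : List Char) :
    ∀ (j : Nat), (∃ i, i ≤ j ∧ sub <+: s.drop i) →
      ∃ i : Nat, i ≤ j ∧ PySem.Chars.rfind.go s sub j = (i : Int) ∧ sub <+: s.drop i := by
  intro j
  induction j with
  | zero =>
    rintro ⟨i, hi, hp⟩
    have : i = 0 := Nat.le_zero.mp hi
    subst this
    refine ⟨0, le_rfl, ?_, by simpa using hp⟩
    have : sub.isPrefixOf s = true := by
      rw [List.isPrefixOf_iff_prefix]; simpa using hp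
    simp [PySem.Chars.rfind.go, this]
  | succ j ih =>
    rintro ⟨i, hi, hp⟩
    by_cases htop : sub.isPrefixOf (s.drop (j + 1)) = true
    · refine ⟨j + 1, le_rfl, ?_, List.isPrefixOf_iff_prefix.mp htop⟩
      simp [PySem.Chars.rfind.go, htop]
    · have hij : i ≤ j := by
        rcases Nat.lt_or_ge i (j + 1) with h | h
        · omega
        · exfalso
          have : i = j + 1 := by omega
          subst this
          exact htop (List.isPrefixOf_iff_prefix.mpr hp)
      obtain ⟨i', hi', hgo, hp'⟩ := ih ⟨i, hij, hp⟩
      refine ⟨i', Nat.le_succ_of_le hi', ?_, hp'⟩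
      simp [PySem.Chars.rfind.go, htop, hgo]

theorem pvRfind_found (s sub : List Char) (hsub : sub ≠ []) (h : PySem.Chars.isIn sub s = true) :
    ∃ i : Nat, PySem.Chars.rfind s sub = (i : Int) ∧ sub <+: s.drop i ∧ i < s.length := by
  obtain ⟨j, hj⟩ := (PySem.Chars.exists_prefix_drop_iff_isIn sub s).mpr h
  have hjlen : j ≤ s.length := by
    by_contra hgt
    have : s.drop j = [] := List.drop_eq_nil_of_le (by omega)
    rw [this] at hj
    exact hsub (List.prefix_nil.mp hj)
  obtain ⟨i, hile, hgo, hp⟩ := pvRfindGo_found s sub s.length ⟨j, hjlen, hj⟩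
  refine ⟨i, hgo, hp, ?_⟩
  by_contra hge
  have : s.drop i = [] := List.drop_eq_nil_of_le (by omega)
  rw [this] at hp
  exact hsub (List.prefix_nil.mp hp)

-- ===== VERDICT (by name: the statement is the Claim_ definition above) =====
set_option maxHeartbeats 1000000 in
theorem preencode_password_special_chars_spec : Claim_equal_preencode_password_special_chars := by
  intro cs _
  unfold Spec_preencode_password_special_chars
  cases cs with
  | none => rfl
  | some s =>
    simp only [preencode_password_special_chars, preencode_password_special_chars_alt,
      pvPasswordSpan]
    by_cases h1 : PySem.Str.isIn "://" s = false
    · rw [if_pos h1, if_pos h1]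
    · rw [if_neg h1, if_neg h1]
      set rest := ((PySem.Str.splitMax? s "://" 1).getD []).getD 1 "" with hrest
      by_cases h2 : PySem.Str.isIn "@" rest = false
      · rw [if_pos h2, if_pos h2]
      · rw [if_neg h2, if_neg h2]
        set atI := PySem.Str.rfind rest "@" with hatI
        set creds := PySem.Str.slice rest none (some atI) with hcreds
        clear_value rest atI creds
        by_cases h3 : PySem.Str.isIn ":" creds = false
        · rw [if_pos h3, if_pos h3]
        · rw [if_neg h3, if_neg h3]
          -- facts about the '@' position
          have h2' : PySem.Chars.isIn ['@'] rest.toList = true := by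
            have : PySem.Str.isIn "@" rest = true := by
              cases hb : PySem.Str.isIn "@" rest
              · exact absurd hb h2
              · rfl
            simpa using this
          obtain ⟨i, hat, hpre, hilen⟩ :=
            pvRfind_found rest.toList ['@'] (by simp) h2'
          have hatI' : atI = (i : Int) := by
            rw [hatI]
            simpa using hat
          have hcredsL : creds.toList = rest.toList.take i := by
            rw [hcreds, PySem.Str.toList_slice, PySem.Chars.slice_eq_listSlice, hatI',
              PySem.List.slice_to_natCast]
          -- facts about the ':' position
          have h3' : PySem.Chars.isIn [':'] creds.toList = true := by
            have : PySem.Str.isIn ":" creds = true := by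
              cases hb : PySem.Str.isIn ":" creds
              · exact absurd hb h3
              · rfl
            simpa using this
          have hfnn : 0 ≤ PySem.Chars.find creds.toList [':'] :=
            (PySem.Chars.find_nonneg_iff _ _).mpr ((PySem.Chars.isIn_iff_infix _ _).mp h3')
          set c := (PySem.Chars.find creds.toList [':']).toNat with hcdef
          have hfind : PySem.Chars.find creds.toList [':'] = (c : Int) :=
            (Int.toNat_of_nonneg hfnn).symm
          have hcp : [':'] <+: creds.toList.drop c := (PySem.Chars.find_spec hfnn).1
          have hclen : c < creds.toList.length := by
            by_contra hge
            have : creds.toList.drop c = [] := List.drop_eq_nil_of_le (by omega)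
            rw [this] at hcp
            simp at hcp
          have hci : c < i := by
            rw [hcredsL] at hclen
            simp at hclen
            omega
          -- the two cons decompositions
          have hdropL : rest.toList.drop i = '@' :: rest.toList.drop (i + 1) := by
            obtain ⟨t, ht⟩ := hpre
            have htail : (rest.toList.drop i).tail = rest.toList.drop (i + 1) := List.tail_drop ..
            rw [← ht] at htail ⊢
            simp at htail
            rw [htail, List.singleton_append]
          have hdropC : creds.toList.drop c = ':' :: creds.toList.drop (c + 1) := by
            obtain ⟨t, ht⟩ := hcp
            have htail : (creds.toList.drop c).tail = creds.toList.drop (c + 1) := List.tail_drop ..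
            rw [← ht] at htail ⊢
            simp at htail
            rw [htail, List.singleton_append]
          have htakeL : rest.toList.take (c + 1) = creds.toList.take c ++ [':'] := by
            have h1' : rest.toList.take (c + 1) = creds.toList.take (c + 1) := by
              rw [hcredsL, List.take_take, Nat.min_eq_left (by omega)]
            rw [h1', List.take_add, hdropC]
            simp
          have htakeMid : (rest.toList.drop (c + 1)).take (i - (c + 1)) = creds.toList.drop (c + 1) := by
            rw [hcredsL, List.drop_take]
          have hfindStr : PySem.Str.find creds ":" = (c : Int) := by
            simpa using hfind
          -- reduce both sides to lists and finish
          refine String.toList_inj.mp ?_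
          simp only [String.toList_append, PySem.Str.toList_slice, PySem.Chars.slice_eq_listSlice,
            PySem.Str.toList_join, pvEncA_toList, hfindStr, hatI']
          rw [show ((c : Int) + 1) = ((c + 1 : Nat) : Int) by push_cast; ring,
            show ((i : Int) + 1) = ((i + 1 : Nat) : Int) by push_cast; ring]
          rw [PySem.List.slice_to_natCast, PySem.List.slice_from_natCast,
            PySem.List.slice_to_natCast, PySem.List.slice_natCast,
            PySem.List.slice_from_natCast, PySem.List.slice_from_natCast]
          rw [show ("" : String).toList = ([] : List Char) from rfl, pvJoin_nil_flatten, List.map_map]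
          rw [htakeL, htakeMid, hdropL]
          simp [List.append_assoc, Function.comp_def]
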